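-- pv_equiv track=rewrite | github.com/dcwalker/TildeSlashDotAsterisk | exact_scripts/executable_skills-list.py | aggregate_by_skill
-- ===== SOURCE A (Python) =====
-- from typing import Any, Dict, List, Optional, Tuple
--
-- def aggregate_by_skill(
--     rows: List[Tuple[str, str, str, List[str], Dict[str, str]]],
-- ) -> List[Tuple[str, List[str], List[str], List[str], Dict[str, str]]]:
--     """Group by skill name; return (name, sources, agents, scripts, info)."""
--     by_name: Dict[str, Tuple[set, set, set, Dict[str, str]]] = {}
--     for name, source, agent, scripts, info in rows:
--         if name not in by_name:
--             by_name[name] = (set(), set(), set(), info)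
--         by_name[name][0].add(source)
--         by_name[name][1].add(agent)
--         by_name[name][2].update(scripts)
--     return [
--         (name, sorted(sources), sorted(agents), sorted(script_set), info)
--         for name, (sources, agents, script_set, info) in sorted(by_name.items())
--     ]
-- ===== SOURCE B (Python) =====
-- from typing import Dict, List, Tuple
--
-- def aggregate_by_skill(
--     rows: List[Tuple[str, str, str, List[str], Dict[str, str]]],
-- ) -> List[Tuple[str, List[str], List[str], List[str], Dict[str, str]]]:
--     """Group by skill name; return (name, sources, agents, scripts, info)."""
--     out = []
--     for name in sorted({r[0] for r in rows}):
--         group = [r for r in rows if r[0] == name]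
--         sources = sorted({r[1] for r in group})
--         agents = sorted({r[2] for r in group})
--         scripts = sorted({s for r in group for s in r[3]})
--         out.append((name, sources, agents, scripts, group[0][4]))
--     return out
-- ===== Notes on version B (the rewrite author's own statement) =====
-- stated objective: alternative
-- what changed: Replaces A's single-pass dict-of-sets accumulation plus final sort of items by a direct construction: sort the distinct names, then for each name filter its group out of rows and build each sorted set from the group in one comprehension.
import Mathlib
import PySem

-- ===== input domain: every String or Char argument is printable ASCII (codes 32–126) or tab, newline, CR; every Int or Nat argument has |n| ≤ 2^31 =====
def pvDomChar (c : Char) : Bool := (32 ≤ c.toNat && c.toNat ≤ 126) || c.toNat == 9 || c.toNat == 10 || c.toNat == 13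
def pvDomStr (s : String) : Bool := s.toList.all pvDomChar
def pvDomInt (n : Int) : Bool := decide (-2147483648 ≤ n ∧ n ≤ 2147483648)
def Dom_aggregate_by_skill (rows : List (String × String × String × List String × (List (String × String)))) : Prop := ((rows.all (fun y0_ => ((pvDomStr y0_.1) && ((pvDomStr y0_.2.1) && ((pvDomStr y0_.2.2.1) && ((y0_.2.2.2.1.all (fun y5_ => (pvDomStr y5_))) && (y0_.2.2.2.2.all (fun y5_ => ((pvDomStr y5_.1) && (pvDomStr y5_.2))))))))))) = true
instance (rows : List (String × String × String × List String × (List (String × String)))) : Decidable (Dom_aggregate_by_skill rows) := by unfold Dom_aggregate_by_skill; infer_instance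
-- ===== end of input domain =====

-- B replaces A's one-pass dict-of-sets accumulation (plus a final sort of the items) by a direct
-- construction: sort the distinct names, then filter each name's group out of rows (objective: alternative).

-- ===== PORT A =====
-- one body of A's 'for' loop: conditional fresh insert, then the three in-place set updates on by_name[name]
def pvAggStep (d : PySem.Dict String (PySem.Set String × PySem.Set String × PySem.Set String × List (String × String)))
    (r : String × String × String × List String × (List (String × String))) :
    PySem.Dict String (PySem.Set String × PySem.Set String × PySem.Set String × List (String × String)) :=
  let d := if d.contains r.1 then d else d.insert r.1 (PySem.Set.empty, PySem.Set.empty, PySem.Set.empty, r.2.2.2.2)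
  d.modify r.1 (PySem.Set.empty, PySem.Set.empty, PySem.Set.empty, [])
    (fun e => (PySem.Set.add e.1 r.2.1, PySem.Set.add e.2.1 r.2.2.1, PySem.Set.update e.2.2.1 r.2.2.2.1, e.2.2.2))

def aggregate_by_skill (rows : List (String × String × String × List String × (List (String × String)))) : List (String × List String × List String × List String × (List (String × String))) :=
  let by_name := rows.foldl pvAggStep PySem.Dict.empty
  -- sorted(by_name.items()): the keys are distinct, so Python's tuple comparison never reads the
  -- (uncomparable) second components — keyed on .1 here, which is exactly that comparison
  (PySem.List.sorted by_name.items (fun p => p.1) false).map (fun p =>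
    (p.1, PySem.List.sorted p.2.1 (fun x => x) false, PySem.List.sorted p.2.2.1 (fun x => x) false,
      PySem.List.sorted p.2.2.2.1 (fun x => x) false, p.2.2.2.2))

-- ===== PORT B =====
def aggregate_by_skill_alt (rows : List (String × String × String × List String × (List (String × String)))) : List (String × List String × List String × List String × (List (String × String))) :=
  (PySem.List.sorted (PySem.Set.ofList (rows.map (fun r => r.1))) (fun x => x) false).map (fun name =>
    let group := rows.filter (fun r => r.1 == name)
    (name,
      PySem.List.sorted (PySem.Set.ofList (group.map (fun r => r.2.1))) (fun x => x) false,
      PySem.List.sorted (PySem.Set.ofList (group.map (fun r => r.2.2.1))) (fun x => x) false,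
      PySem.List.sorted (PySem.Set.ofList (group.flatMap (fun r => r.2.2.2.1))) (fun x => x) false,
      -- group[0]: the group is nonempty because name was drawn from rows, so the default is never read
      (group.headD ("", "", "", [], [])).2.2.2.2))

-- ===== PRECONDITION & SPEC =====
def Spec_aggregate_by_skill (rows : List (String × String × String × List String × (List (String × String)))) (out : List (String × List String × List String × List String × (List (String × String)))) : Prop := out = aggregate_by_skill_alt rows
instance (rows : List (String × String × String × List String × (List (String × String)))) (out : List (String × List String × List String × List String × (List (String × String)))) : Decidable (Spec_aggregate_by_skill rows out) := by
  unfold Spec_aggregate_by_skill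
  -- (built stepwise only because the one-shot DecidableEq synthesis of the 5-tuple exceeds the default synthesis size)
  have i2 : DecidableEq (List String × List String × List (String × String)) := inferInstance
  have i3 : DecidableEq (List String × List String × List String × List (String × String)) := @instDecidableEqProd _ _ _ i2
  have i4 : DecidableEq (String × List String × List String × List String × List (String × String)) := @instDecidableEqProd _ _ _ i3
  exact @instDecidableEqList _ i4 _ _

-- ===== CLAIM (what is proved, stated in full; the proofs are below) =====
def Claim_equal_aggregate_by_skill : Prop := ∀ (rows : List (String × String × String × List String × (List (String × String)))), Dom_aggregate_by_skill rows → Spec_aggregate_by_skill rows (aggregate_by_skill rows)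

-- ===== LEMMAS AND PROOFS =====

-- the pure value-level accumulation A performs on one name's group
def pvAgg (e : PySem.Set String × PySem.Set String × PySem.Set String × List (String × String))
    (grp : List (String × String × String × List String × (List (String × String)))) :
    PySem.Set String × PySem.Set String × PySem.Set String × List (String × String) :=
  grp.foldl (fun e r => (PySem.Set.add e.1 r.2.1, PySem.Set.add e.2.1 r.2.2.1, PySem.Set.update e.2.2.1 r.2.2.2.1, e.2.2.2)) e

theorem pvAgg_spec (grp : List (String × String × String × List String × (List (String × String))))
    (e : PySem.Set String × PySem.Set String × PySem.Set String × List (String × String)) :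
    pvAgg e grp = ((grp.map (fun r => r.2.1)).foldl PySem.Set.add e.1,
      (grp.map (fun r => r.2.2.1)).foldl PySem.Set.add e.2.1,
      grp.foldl (fun s r => PySem.Set.update s r.2.2.2.1) e.2.2.1,
      e.2.2.2) := by
  induction grp generalizing e with
  | nil => rfl
  | cons r t ih => simp [pvAgg, List.foldl_cons] at *; rw [ih]

theorem pv_update_flatMap (grp : List (String × String × String × List String × (List (String × String))))
    (s : PySem.Set String) :
    grp.foldl (fun s r => PySem.Set.update s r.2.2.2.1) s = PySem.Set.update s (grp.flatMap (fun r => r.2.2.2.1)) := by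
  induction grp generalizing s with
  | nil => rfl
  | cons r t ih =>
    show t.foldl _ (PySem.Set.update s r.2.2.2.1) = PySem.Set.update s (r.2.2.2.1 ++ t.flatMap _)
    rw [ih]
    show _ = (r.2.2.2.1 ++ t.flatMap _).foldl PySem.Set.add s
    rw [List.foldl_append]
    rfl

theorem pv_get?_modify_of_ne {κ ν : Type} [BEq κ] [LawfulBEq κ] (d : PySem.Dict κ ν) (k k' : κ) (h : k' ≠ k) (d0 : ν) (f : ν → ν) :
    (d.modify k d0 f).get? k' = d.get? k' := by
  -- modify is definitionally insert of the modified value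
  show (d.insert k (f (d.getD k d0))).get? k' = d.get? k'
  exact PySem.Dict.get?_insert_of_ne d _ h

theorem pv_get?_fold (rows : List (String × String × String × List String × (List (String × String))))
    (d₀ : PySem.Dict String (PySem.Set String × PySem.Set String × PySem.Set String × List (String × String)))
    (name : String) :
    (rows.foldl pvAggStep d₀).get? name =
      match d₀.get? name with
      | some e => some (pvAgg e (rows.filter (fun r => r.1 == name)))
      | none =>
        match rows.filter (fun r => r.1 == name) with
        | [] => none
        | r :: rest => some (pvAgg (PySem.Set.empty, PySem.Set.empty, PySem.Set.empty, r.2.2.2.2) (r :: rest)) := by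
  induction rows generalizing d₀ with
  | nil =>
    simp only [List.foldl_nil, List.filter_nil]
    cases h : d₀.get? name with
    | none => rfl
    | some e => rfl
  | cons r rest ih =>
    rw [List.foldl_cons, ih]
    by_cases hr : r.1 = name
    · have hf : (r :: rest).filter (fun r => r.1 == name) = r :: rest.filter (fun r => r.1 == name) := by
        simp [hr]
      cases h : d₀.get? name with
      | some e =>
        have hcont : d₀.contains r.1 = true := by
          rw [hr, PySem.Dict.contains_eq_isSome_get?, h]; rfl
        have hstep : (pvAggStep d₀ r).get? name =
            some (PySem.Set.add e.1 r.2.1, PySem.Set.add e.2.1 r.2.2.1, PySem.Set.update e.2.2.1 r.2.2.2.1, e.2.2.2) := by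
          show ((if d₀.contains r.1 then d₀ else _).modify r.1 _ _).get? name = _
          rw [if_pos hcont, hr]
          show (d₀.insert name _).get? name = _
          rw [PySem.Dict.get?_insert_self, PySem.Dict.getD_eq_get?_getD, h]
          rfl
        rw [hstep, hf]
        simp [pvAgg]
      | none =>
        have hcont : d₀.contains r.1 = false := by
          rw [hr, PySem.Dict.contains_eq_isSome_get?, h]; rfl
        have hstep : (pvAggStep d₀ r).get? name =
            some (pvAgg (PySem.Set.empty, PySem.Set.empty, PySem.Set.empty, r.2.2.2.2) [r]) := by
          show ((if d₀.contains r.1 then d₀ else _).modify r.1 _ _).get? name = _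
          rw [if_neg (by simp [hcont]), hr]
          show ((d₀.insert name _).insert name _).get? name = _
          rw [PySem.Dict.get?_insert_self, PySem.Dict.getD_insert_self]
          rfl
        rw [hstep, hf]
        simp [pvAgg]
    · have hne : name ≠ r.1 := fun hh => hr hh.symm
      have hf : (r :: rest).filter (fun r => r.1 == name) = rest.filter (fun r => r.1 == name) := by
        simp [hr]
      have hstep : (pvAggStep d₀ r).get? name = d₀.get? name := by
        show ((if d₀.contains r.1 then d₀ else _).modify r.1 _ _).get? name = _
        rw [pv_get?_modify_of_ne _ r.1 name hne]
        by_cases hc : d₀.contains r.1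
        · rw [if_pos hc]
        · rw [if_neg (by simp [hc]), PySem.Dict.get?_insert_of_ne d₀ _ hne]
      rw [hstep, hf]

theorem pv_keys_fold (rows : List (String × String × String × List String × (List (String × String))))
    (d₀ : PySem.Dict String (PySem.Set String × PySem.Set String × PySem.Set String × List (String × String))) :
    (rows.foldl pvAggStep d₀).keys = PySem.Set.update d₀.keys (rows.map (fun r => r.1)) := by
  induction rows generalizing d₀ with
  | nil => rfl
  | cons r rest ih =>
    rw [List.foldl_cons, ih]
    have hstep : (pvAggStep d₀ r).keys = PySem.Set.add d₀.keys r.1 := by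
      show ((if d₀.contains r.1 then d₀ else _).modify r.1 _ _).keys = _
      by_cases hc : d₀.contains r.1 = true
      · rw [if_pos hc]
        show (d₀.insert r.1 _).keys = _
        rw [PySem.Dict.keys_insert_of_contains _ _ hc]
        simp [PySem.Set.add]
        exact (PySem.Dict.contains_iff_mem_keys d₀ r.1).mp hc
      · rw [if_neg hc]
        have hc' : d₀.contains r.1 = false := by simpa using hc
        show ((d₀.insert r.1 _).insert r.1 _).keys = _
        rw [PySem.Dict.keys_insert_of_contains _ _ (by
            rw [PySem.Dict.contains_insert]; simp),
          PySem.Dict.keys_insert_of_not_contains _ _ hc']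
        have hmem : r.1 ∉ d₀.keys := by
          intro hmem
          rw [(PySem.Dict.contains_iff_mem_keys d₀ r.1).mpr hmem] at hc'
          cases hc'
        simp [PySem.Set.add]
        exact hmem
    rw [hstep]
    rfl

-- ===== VERDICT (by name: the statement is the Claim_ definition above) =====
theorem aggregate_by_skill_spec : Claim_equal_aggregate_by_skill := by
  intro rows _
  show aggregate_by_skill rows = aggregate_by_skill_alt rows
  unfold aggregate_by_skill aggregate_by_skill_alt
  have hkeys : (rows.foldl pvAggStep PySem.Dict.empty).keys = PySem.Set.ofList (rows.map (fun r => r.1)) := by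
    rw [pv_keys_fold]; rfl
  have hnd : (rows.foldl pvAggStep PySem.Dict.empty).keys.Nodup := by
    rw [hkeys]; exact PySem.Set.nodup_ofList _
  have hitems := PySem.Dict.items_eq_map_keys (rows.foldl pvAggStep PySem.Dict.empty) hnd
    (PySem.Set.empty, PySem.Set.empty, PySem.Set.empty, ([] : List (String × String)))
  have hsorted : PySem.List.sorted (rows.foldl pvAggStep PySem.Dict.empty).items (fun p => p.1) =
      (PySem.List.sorted (PySem.Set.ofList (rows.map (fun r => r.1))) (fun x => x)).map
        (fun k => (k, (rows.foldl pvAggStep PySem.Dict.empty).getD k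
          (PySem.Set.empty, PySem.Set.empty, PySem.Set.empty, ([] : List (String × String))))) := by
    apply PySem.List.sorted_eq_of_perm_of_pairwise_lt
    · rw [hitems, hkeys]
      exact (PySem.List.sorted_perm _ _ _).map _
    · exact List.Pairwise.map _ (fun a b h => h) (PySem.List.sorted_ofList_pairwise_lt _)
  simp only [hsorted, List.map_map]
  apply List.map_congr_left
  intro x hx
  have hx' : x ∈ rows.map (fun r => r.1) := by
    rw [PySem.List.mem_sorted] at hx
    exact (PySem.Set.mem_ofList _ _).mp hx
  obtain ⟨r, hrmem, hr1⟩ := List.mem_map.mp hx'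
  have hrg : r ∈ rows.filter (fun r => r.1 == x) := by
    rw [List.mem_filter]
    exact ⟨hrmem, by simp [hr1]⟩
  cases hg : rows.filter (fun r => r.1 == x) with
  | nil => rw [hg] at hrg; cases hrg
  | cons r0 rest0 =>
    have hget : (rows.foldl pvAggStep PySem.Dict.empty).get? x =
        some (pvAgg (PySem.Set.empty, PySem.Set.empty, PySem.Set.empty, r0.2.2.2.2) (r0 :: rest0)) := by
      rw [pv_get?_fold rows PySem.Dict.empty x]
      rw [show (PySem.Dict.empty : PySem.Dict String (PySem.Set String × PySem.Set String × PySem.Set String × List (String × String))).get? x = none from rfl]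
      rw [hg]
    have hgetD : (rows.foldl pvAggStep PySem.Dict.empty).getD x
        (PySem.Set.empty, PySem.Set.empty, PySem.Set.empty, ([] : List (String × String))) =
        pvAgg (PySem.Set.empty, PySem.Set.empty, PySem.Set.empty, r0.2.2.2.2) (r0 :: rest0) := by
      rw [PySem.Dict.getD_eq_get?_getD, hget]; rfl
    simp only [Function.comp, hgetD, pvAgg_spec]
    refine Prod.ext rfl (Prod.ext ?_ (Prod.ext ?_ (Prod.ext ?_ ?_))) <;> simp only []
    · rfl
    · rfl
    · rw [pv_update_flatMap]; rfl
    · rfl
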